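-- pv_equiv track=rewrite | github.com/Sharad2001/Data-structures-and-algorithms | special_keyboard_II.py | optimalKeys
-- ===== SOURCE A (Python) =====
-- def optimalKeys(N):
--     if (N <= 6):
--         return N
--
--     screen = [0] * N
--     for n in range(1, 7):
--         screen[n - 1] = n
--     for n in range(7, N + 1):
--         screen[n - 1] = 0
--
--         for b in range(n - 3, 0, -1):
--             curr = (n - b - 1) * screen[b - 1]
--             if (curr > screen[n - 1]):
--                 screen[n - 1] = curr
--     return screen[N - 1]
-- ===== SOURCE B (Python) =====
-- def optimalKeys(N):
--     # O(N) DP: for n >= 7 the best is always 3*f(n-4) or 4*f(n-5); keep a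
--     # sliding window of the last five values instead of the whole table.
--     if N <= 6:
--         return N
--     a, b, c, d, e = 2, 3, 4, 5, 6  # f(n-5), f(n-4), f(n-3), f(n-2), f(n-1)
--     for _ in range(7, N + 1):
--         a, b, c, d, e = b, c, d, e, max(4 * a, 3 * b)
--     return e
-- ===== Notes on version B (the rewrite author's own statement) =====
-- stated objective: faster
-- what changed: Replaces the O(N^2) full inner scan over all breakpoints b with an O(N) sliding window of the last five DP values, using the provable fact that for n>=7 the optimum is always 3*f(n-4) or 4*f(n-5).
import Mathlib
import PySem

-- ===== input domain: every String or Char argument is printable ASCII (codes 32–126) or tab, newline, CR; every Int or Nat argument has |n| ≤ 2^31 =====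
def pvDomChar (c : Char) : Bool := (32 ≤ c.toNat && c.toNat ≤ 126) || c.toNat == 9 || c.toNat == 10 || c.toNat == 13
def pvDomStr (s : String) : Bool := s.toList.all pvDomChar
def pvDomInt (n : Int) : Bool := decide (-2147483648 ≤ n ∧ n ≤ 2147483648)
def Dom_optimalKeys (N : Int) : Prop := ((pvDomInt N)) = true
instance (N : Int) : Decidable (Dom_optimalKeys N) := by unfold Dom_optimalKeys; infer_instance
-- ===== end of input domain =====

set_option maxRecDepth 8000


-- B replaces A's quadratic scan over every breakpoint with a linear sliding-window DP
-- keeping only the last five values (objective: faster, asymptotically).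

-- ===== PORT A =====
def optimalKeys (N : Int) : Int :=
  if N ≤ 6 then N
  else
    let screen0 : List Int := List.replicate N.toNat 0
    let screen1 := (PySem.List.pyRange 1 7 1).foldl
      (fun s n => PySem.List.pySetD s (n - 1) n) screen0
    let screen2 := (PySem.List.pyRange 7 (N + 1) 1).foldl
      (fun s n =>
        let s1 := PySem.List.pySetD s (n - 1) 0
        (PySem.List.pyRange (n - 3) 0 (-1)).foldl
          (fun t b =>
            let curr := (n - b - 1) * PySem.List.pyGetD t (b - 1) 0
            if curr > PySem.List.pyGetD t (n - 1) 0
            then PySem.List.pySetD t (n - 1) curr else t) s1) screen1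
    PySem.List.pyGetD screen2 (N - 1) 0

-- ===== PORT B =====
def optimalKeys_alt (N : Int) : Int :=
  if N ≤ 6 then N
  else
    ((PySem.List.pyRange 7 (N + 1) 1).foldl
      (fun (st : Int × Int × Int × Int × Int) _ =>
        (st.2.1, st.2.2.1, st.2.2.2.1, st.2.2.2.2, max (4 * st.1) (3 * st.2.1)))
      (2, 3, 4, 5, 6)).2.2.2.2

-- ===== PRECONDITION & SPEC =====
def Spec_optimalKeys (N : Int) (out : Int) : Prop := out = optimalKeys_alt N
instance (N : Int) (out : Int) : Decidable (Spec_optimalKeys N out) := by unfold Spec_optimalKeys; infer_instance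

-- ===== CLAIM (what is proved, stated in full; the proofs are below) =====
def Claim_equal_optimalKeys : Prop := ∀ (N : Int), Dom_optimalKeys N → Spec_optimalKeys N (optimalKeys N)

-- ===== LEMMAS AND PROOFS =====

-- the mathematical DP value: fK n = best screen output with n keystrokes (n ≥ 1)
def fK (n : Nat) : Int :=
  if n ≤ 6 then (n : Int)
  else max (3 * fK (n - 4)) (4 * fK (n - 5))
termination_by n
decreasing_by all_goals omega

lemma fK_le_six {n : Nat} (h : n ≤ 6) : fK n = (n : Int) := by
  rw [fK]; simp [h]

lemma fK_rec {n : Nat} (h : 7 ≤ n) : fK n = max (3 * fK (n - 4)) (4 * fK (n - 5)) := by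
  rw [fK]
  have : ¬ n ≤ 6 := by omega
  simp [this]

lemma fK_nonneg (n : Nat) : 0 ≤ fK n := by
  induction n using Nat.strong_induction_on with
  | _ n ih =>
    by_cases h : n ≤ 6
    · rw [fK_le_six h]; positivity
    · rw [fK_rec (by omega)]
      have := ih (n - 4) (by omega)
      exact le_trans (by linarith) (le_max_left _ _)

-- factor 2 never beats factor 3: 2·f(m+1) ≤ 3·f(m) for m ≥ 2
lemma fK_L2 (m : Nat) (h : 2 ≤ m) : 2 * fK (m + 1) ≤ 3 * fK m := by
  induction m using Nat.strong_induction_on with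
  | _ m ih =>
    by_cases hm : m ≤ 10
    · interval_cases m <;> norm_num [fK_rec, fK_le_six]
    · have h1 : fK (m + 1) = max (3 * fK (m - 3)) (4 * fK (m - 4)) := by
        rw [fK_rec (n := m + 1) (by omega)]
        simp only [show m + 1 - 4 = m - 3 from by omega, show m + 1 - 5 = m - 4 from by omega]
      have hrec : fK m = max (3 * fK (m - 4)) (4 * fK (m - 5)) := fK_rec (n := m) (by omega)
      have h2 : 3 * fK (m - 4) ≤ fK m := by rw [hrec]; exact le_max_left _ _
      have h3 : 4 * fK (m - 5) ≤ fK m := by rw [hrec]; exact le_max_right _ _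
      have i1 : 2 * fK (m - 3) ≤ 3 * fK (m - 4) := by
        have := ih (m - 4) (by omega) (by omega)
        have e : m - 4 + 1 = m - 3 := by omega
        rwa [e] at this
      have i2 : 2 * fK (m - 4) ≤ 3 * fK (m - 5) := by
        have := ih (m - 5) (by omega) (by omega)
        have e : m - 5 + 1 = m - 4 := by omega
        rwa [e] at this
      rw [h1]
      rcases max_choice (3 * fK (m - 3)) (4 * fK (m - 4)) with hc | hc <;> rw [hc] <;> linarith

-- f grows by at least ×3 in 4 steps
lemma fK_L3 (m : Nat) (h : 1 ≤ m) : 3 * fK m ≤ fK (m + 4) := by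
  by_cases hm : m ≤ 2
  · interval_cases m <;> norm_num [fK_rec, fK_le_six]
  · have h1 : fK (m + 4) = max (3 * fK m) (4 * fK (m - 1)) := by
      rw [fK_rec (n := m + 4) (by omega)]
      simp only [show m + 4 - 4 = m from by omega, show m + 4 - 5 = m - 1 from by omega]
    rw [h1]; exact le_max_left _ _

-- factor 5 never beats factors 3/4
lemma fK_L5 (m : Nat) (h : 1 ≤ m) : 5 * fK m ≤ max (3 * fK (m + 2)) (4 * fK (m + 1)) := by
  induction m using Nat.strong_induction_on with
  | _ m ih =>
    by_cases hm : m ≤ 10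
    · interval_cases m <;> norm_num [fK_rec, fK_le_six]
    · have h1 : fK (m + 1) = max (3 * fK (m - 3)) (4 * fK (m - 4)) := by
        rw [fK_rec (n := m + 1) (by omega)]
        simp only [show m + 1 - 4 = m - 3 from by omega, show m + 1 - 5 = m - 4 from by omega]
      have key : 5 * fK m ≤ 4 * fK (m + 1) := by
        have hrec : fK m = max (3 * fK (m - 4)) (4 * fK (m - 5)) := fK_rec (n := m) (by omega)
        have hb1 : 4 * fK (m - 4) ≤ fK (m + 1) := by rw [h1]; exact le_max_right _ _
        rcases max_choice (3 * fK (m - 4)) (4 * fK (m - 5)) with hc | hc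
        · have hnn := fK_nonneg (m - 4)
          rw [hrec, hc]; linarith
        · have := ih (m - 5) (by omega) (by omega)
          have e2 : m - 5 + 2 = m - 3 := by omega
          have e1 : m - 5 + 1 = m - 4 := by omega
          rw [e2, e1, ← h1] at this
          rw [hrec, hc]; linarith
      exact le_trans key (le_max_right _ _)

-- every candidate breakpoint is dominated by b = n-4 or b = n-5
lemma fK_C (n b : Nat) (h7 : 7 ≤ n) (hb : 1 ≤ b) (hbn : b + 3 ≤ n) :
    ((n : Int) - b - 1) * fK b ≤ max (3 * fK (n - 4)) (4 * fK (n - 5)) := by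
  by_cases c2 : b + 3 = n
  · have e : ((n : Int) - b - 1) = 2 := by omega
    have eb : b = n - 4 + 1 := by omega
    have := fK_L2 (n - 4) (by omega)
    rw [e, eb]
    exact le_trans this (le_max_left _ _)
  · by_cases c3 : b + 4 = n
    · have e : ((n : Int) - b - 1) = 3 := by omega
      have eb : b = n - 4 := by omega
      rw [e, eb]; exact le_max_left _ _
    · by_cases c4 : b + 5 = n
      · have e : ((n : Int) - b - 1) = 4 := by omega
        have eb : b = n - 5 := by omega
        rw [e, eb]; exact le_max_right _ _
      · by_cases c5 : b + 6 = n
        · have e : ((n : Int) - b - 1) = 5 := by omega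
          have e2 : b + 2 = n - 4 := by omega
          have e1 : b + 1 = n - 5 := by omega
          have := fK_L5 b hb
          rw [e2, e1] at this
          rw [e]; exact this
        · -- coefficient ≥ 6: dominated by the candidate at b + 4
          have hk : (6 : Int) ≤ (n : Int) - b - 1 := by omega
          have h3 := fK_L3 b hb
          have hnn := fK_nonneg b
          have step : ((n : Int) - b - 1) * fK b ≤ ((n : Int) - (b + 4) - 1) * fK (b + 4) := by
            have hmul : ((n : Int) - b - 5) * (3 * fK b) ≤ ((n : Int) - b - 5) * fK (b + 4) :=
              mul_le_mul_of_nonneg_left h3 (by omega)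
            nlinarith
          have hrecur := fK_C n (b + 4) h7 (by omega) (by omega)
          rw [show ((b + 4 : Nat) : Int) = (b : Int) + 4 from by push_cast; ring] at hrecur
          exact le_trans step hrecur
  termination_by n - b

-- generic facts about folding a running maximum
lemma foldl_max_le {α : Type} (l : List α) (f : α → Int) (K : Int) (acc : Int)
    (h0 : acc ≤ K) (h : ∀ x ∈ l, f x ≤ K) :
    l.foldl (fun a x => max a (f x)) acc ≤ K := by
  induction l generalizing acc with
  | nil => exact h0
  | cons x xs ih =>
    exact ih _ (max_le h0 (h x (by simp))) (fun y hy => h y (by simp [hy]))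

lemma le_foldl_max_init {α : Type} (l : List α) (f : α → Int) (acc : Int) :
    acc ≤ l.foldl (fun a x => max a (f x)) acc := by
  induction l generalizing acc with
  | nil => exact le_refl _
  | cons x xs ih => exact le_trans (le_max_left _ _) (ih _)

lemma le_foldl_max_mem {α : Type} (l : List α) (f : α → Int) (acc : Int) (x : α) (hx : x ∈ l) :
    f x ≤ l.foldl (fun a x => max a (f x)) acc := by
  induction l generalizing acc with
  | nil => cases hx
  | cons y ys ih =>
    rcases List.mem_cons.mp hx with h | h
    · subst h
      exact le_trans (le_max_right _ _) (le_foldl_max_init ys f _)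
    · exact ih _ h

-- A's inner loop only writes position n-1 and reads strictly below it
lemma inner_eq (n : Int) (mi : Nat) (hn : n = (mi : Int) + 1) (s : List Int) (hm : mi < s.length)
    (l : List Int) (hl : ∀ b ∈ l, 1 ≤ b ∧ b ≤ n - 3) (acc : Int) :
    l.foldl (fun t b =>
        let curr := (n - b - 1) * PySem.List.pyGetD t (b - 1) 0
        if curr > PySem.List.pyGetD t (n - 1) 0
        then PySem.List.pySetD t (n - 1) curr else t)
      (PySem.List.pySetD s (n - 1) acc)
    = PySem.List.pySetD s (n - 1)
        (l.foldl (fun a b => max a ((n - b - 1) * PySem.List.pyGetD s (b - 1) 0)) acc) := by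
  induction l generalizing acc with
  | nil => rfl
  | cons b bs ih =>
    obtain ⟨hb1, hb2⟩ := hl b (by simp)
    have hsetv : ∀ v : Int, PySem.List.pySetD s (n - 1) v = s.set mi v := by
      intro v; rw [hn]; simp
    have hread_acc : PySem.List.pyGetD (s.set mi acc) (n - 1) 0 = acc := by
      rw [hn]
      simp only [add_sub_cancel_right, PySem.List.pyGetD_natCast, List.getD_eq_getElem?_getD,
        List.getElem?_set_self hm]
      rfl
    have hread_b : ∀ v : Int, PySem.List.pyGetD (s.set mi v) (b - 1) 0 = PySem.List.pyGetD s (b - 1) 0 := by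
      intro v
      have h0 : (0 : Int) ≤ b - 1 := by omega
      have hlt2 : b - 1 < ((s.set mi v).length : Int) := by
        simp only [List.length_set]; omega
      rw [PySem.List.pyGetD_eq_getElem _ _ h0 hlt2,
          PySem.List.pyGetD_eq_getElem _ _ h0 (by omega : b - 1 < (s.length : Int))]
      apply List.getElem_set_ne
      omega
    have hset2 : ∀ v : Int, PySem.List.pySetD (s.set mi acc) (n - 1) v = s.set mi v := by
      intro v; rw [hn]; simp [List.set_set]
    simp only [List.foldl_cons, hsetv, hread_acc, hread_b, hset2]
    have hstep : (if (n - b - 1) * PySem.List.pyGetD s (b - 1) 0 > acc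
          then s.set mi ((n - b - 1) * PySem.List.pyGetD s (b - 1) 0) else s.set mi acc)
        = s.set mi (max acc ((n - b - 1) * PySem.List.pyGetD s (b - 1) 0)) := by
      rcases le_or_gt ((n - b - 1) * PySem.List.pyGetD s (b - 1) 0) acc with hc | hc
      · rw [if_neg (not_lt.mpr hc), max_eq_left hc]
      · rw [if_pos hc, max_eq_right hc.le]
    rw [hstep, ← hsetv, ih (fun x hx => hl x (by simp [hx])), hsetv]

-- the DP table after the outer loop has processed keystroke counts up to m
def tbl (M m : Nat) : List Int :=
  (List.range m).map (fun i => fK (i + 1)) ++ List.replicate (M - m) 0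

lemma tbl_length (M m : Nat) (h : m ≤ M) : (tbl M m).length = M := by
  simp [tbl]; omega

lemma tbl_getD (M m i : Nat) (hi : i < m) : (tbl M m).getD i 0 = fK (i + 1) := by
  rw [tbl, List.getD_eq_getElem?_getD, List.getElem?_append_left (by simpa using hi)]
  simp [hi]

lemma tbl_set (M m : Nat) (h : m < M) :
    (tbl M m).set m (fK (m + 1)) = tbl M (m + 1) := by
  rw [tbl, tbl, List.set_append_right _ _ (by simp),
      show M - m = (M - (m + 1)) + 1 from by omega, List.replicate_succ]
  simp [List.range_succ]

lemma init_eq (M : Nat) (hM : 7 ≤ M) :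
    (PySem.List.pyRange 1 7 1).foldl (fun s n => PySem.List.pySetD s (n - 1) n)
      (List.replicate M 0) = tbl M 6 := by
  have hr : PySem.List.pyRange 1 7 1 = [1, 2, 3, 4, 5, 6] := by decide
  have hM6 : M = 6 + (M - 6) := by omega
  rw [hr, hM6, show (6 : Nat) + (M - 6) = (M - 6) + 6 from by omega]
  simp only [List.replicate_succ]
  have h6 : M - 6 + 6 - 6 = M - 6 := by omega
  rw [tbl, h6]
  have hmap : List.map (fun i => fK (i + 1)) (List.range 6) = [1, 2, 3, 4, 5, 6] := by
    norm_num [List.range_succ, fK_le_six]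
  rw [hmap]
  norm_num [PySem.List.pySetD_of_nonneg, List.foldl_cons, List.foldl_nil]
  norm_num [show Int.toNat 2 = 2 from rfl, show Int.toNat 3 = 3 from rfl,
    show Int.toNat 4 = 4 from rfl, show Int.toNat 5 = 5 from rfl, List.set]

-- the inner maximum over all breakpoints equals the two-candidate value fK (m+1)
lemma V_eq (M m : Nat) (h6 : 6 ≤ m) :
    ((PySem.List.pyRange (((m : Int) + 1) - 3) 0 (-1)).foldl
      (fun a b => max a ((((m : Int) + 1) - b - 1) * PySem.List.pyGetD (tbl M m) (b - 1) 0)) 0)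
      = fK (m + 1) := by
  have hrec : fK (m + 1) = max (3 * fK (m + 1 - 4)) (4 * fK (m + 1 - 5)) :=
    fK_rec (n := m + 1) (by omega)
  apply le_antisymm
  · apply foldl_max_le _ _ _ _ (fK_nonneg _)
    intro b hb
    rw [PySem.List.mem_pyRange_neg_one] at hb
    obtain ⟨hb0, hb1⟩ := hb
    have h1 : 1 ≤ b.toNat := by omega
    have h2 : b.toNat + 3 ≤ m + 1 := by omega
    have hget : PySem.List.pyGetD (tbl M m) (b - 1) 0 = fK b.toNat := by
      have he : b - 1 = ((b.toNat - 1 : Nat) : Int) := by omega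
      rw [he, PySem.List.pyGetD_natCast, tbl_getD M m (b.toNat - 1) (by omega),
        show b.toNat - 1 + 1 = b.toNat from by omega]
    rw [hget]
    have hC := fK_C (m + 1) b.toNat (by omega) h1 h2
    rw [← hrec] at hC
    have he2 : ((m : Int) + 1 - b - 1) = ((m + 1 : Nat) : Int) - b.toNat - 1 := by
      push_cast; omega
    rw [he2]
    exact hC
  · rw [hrec]
    have hgen : ∀ c : Nat, 1 ≤ c → c + 3 ≤ m + 1 →
        (((m : Int) + 1) - ((c : Nat) : Int) - 1) * fK c ≤
          (PySem.List.pyRange (((m : Int) + 1) - 3) 0 (-1)).foldl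
            (fun a b => max a ((((m : Int) + 1) - b - 1) * PySem.List.pyGetD (tbl M m) (b - 1) 0)) 0 := by
      intro c hc3 hcm
      have hmem : ((c : Nat) : Int) ∈ PySem.List.pyRange (((m : Int) + 1) - 3) 0 (-1) := by
        rw [PySem.List.mem_pyRange_neg_one]
        omega
      have hget : PySem.List.pyGetD (tbl M m) (((c : Nat) : Int) - 1) 0 = fK c := by
        have he : ((c : Nat) : Int) - 1 = ((c - 1 : Nat) : Int) := by omega
        rw [he, PySem.List.pyGetD_natCast, tbl_getD M m (c - 1) (by omega),
          show c - 1 + 1 = c from by omega]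
      have := le_foldl_max_mem (PySem.List.pyRange (((m : Int) + 1) - 3) 0 (-1))
        (fun b => (((m : Int) + 1) - b - 1) * PySem.List.pyGetD (tbl M m) (b - 1) 0) 0 _ hmem
      simpa [hget] using this
    apply max_le
    · have := hgen (m - 3) (by omega) (by omega)
      have he : (((m : Int) + 1) - ((m - 3 : Nat) : Int) - 1) = 3 := by omega
      rw [he, show m - 3 = m + 1 - 4 from by omega] at this
      exact this
    · have := hgen (m - 4) (by omega) (by omega)
      have he : (((m : Int) + 1) - ((m - 4 : Nat) : Int) - 1) = 4 := by omega
      rw [he, show m - 4 = m + 1 - 5 from by omega] at this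
      exact this

lemma outer_loop (M m : Nat) (h6 : 6 ≤ m) (hM : m ≤ M) :
    (PySem.List.pyRange 7 ((m : Int) + 1) 1).foldl
      (fun s n =>
        let s1 := PySem.List.pySetD s (n - 1) 0
        (PySem.List.pyRange (n - 3) 0 (-1)).foldl
          (fun t b =>
            let curr := (n - b - 1) * PySem.List.pyGetD t (b - 1) 0
            if curr > PySem.List.pyGetD t (n - 1) 0
            then PySem.List.pySetD t (n - 1) curr else t) s1) (tbl M 6) = tbl M m := by
  induction m, h6 using Nat.le_induction with
  | base =>
    rw [show ((6 : Nat) : Int) + 1 = 7 from by norm_num,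
      PySem.List.pyRange_one_eq_nil (le_refl 7)]
    rfl
  | succ m hm ih =>
    have hmM : m ≤ M := by omega
    have hstep1 : ((m + 1 : Nat) : Int) + 1 = ((m : Int) + 1) + 1 := by push_cast; ring
    rw [hstep1, PySem.List.pyRange_one_succ_right (by omega : (7 : Int) ≤ (m : Int) + 1),
      List.foldl_append, ih hmM]
    simp only [List.foldl_cons, List.foldl_nil]
    have hmlt : m < (tbl M m).length := by rw [tbl_length M m hmM]; omega
    have hinner := inner_eq ((m : Int) + 1) m rfl (tbl M m) hmlt
      (PySem.List.pyRange (((m : Int) + 1) - 3) 0 (-1))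
      (by intro b hb; rw [PySem.List.mem_pyRange_neg_one] at hb; omega) 0
    rw [hinner, V_eq M m hm,
      show ((m : Int) + 1) - 1 = ((m : Nat) : Int) from by omega,
      PySem.List.pySetD_natCast, tbl_set M m (by omega)]

lemma optimalKeys_eq (N : Int) (h : ¬ N ≤ 6) : optimalKeys N = fK N.toNat := by
  have hM7 : 7 ≤ N.toNat := by omega
  have hN : N = (N.toNat : Int) := by omega
  unfold optimalKeys
  rw [if_neg h]
  conv_lhs => rw [hN]
  simp only [Int.toNat_natCast]
  rw [init_eq N.toNat hM7, outer_loop N.toNat N.toNat (by omega) (le_refl _),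
    show (N.toNat : Int) - 1 = ((N.toNat - 1 : Nat) : Int) from by omega,
    PySem.List.pyGetD_natCast, tbl_getD N.toNat N.toNat (N.toNat - 1) (by omega),
    show N.toNat - 1 + 1 = N.toNat from by omega]

lemma alt_loop (M : Nat) (h : 6 ≤ M) :
    (PySem.List.pyRange 7 ((M : Int) + 1) 1).foldl
      (fun (st : Int × Int × Int × Int × Int) _ =>
        (st.2.1, st.2.2.1, st.2.2.2.1, st.2.2.2.2, max (4 * st.1) (3 * st.2.1)))
      (2, 3, 4, 5, 6)
      = (fK (M - 4), fK (M - 3), fK (M - 2), fK (M - 1), fK M) := by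
  induction M, h using Nat.le_induction with
  | base =>
    rw [show ((6 : Nat) : Int) + 1 = 7 from by norm_num,
      PySem.List.pyRange_one_eq_nil (le_refl 7)]
    norm_num [fK_le_six]
  | succ m hm ih =>
    rw [show ((m + 1 : Nat) : Int) + 1 = ((m : Int) + 1) + 1 from by push_cast; ring,
      PySem.List.pyRange_one_succ_right (by omega : (7 : Int) ≤ (m : Int) + 1),
      List.foldl_append, ih]
    simp only [List.foldl_cons, List.foldl_nil]
    have hlast : max (4 * fK (m - 4)) (3 * fK (m - 3)) = fK (m + 1) := by
      rw [fK_rec (n := m + 1) (by omega),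
        show m + 1 - 4 = m - 3 from by omega, show m + 1 - 5 = m - 4 from by omega, max_comm]
    rw [show m + 1 - 2 = m - 1 from by omega, show m + 1 - 3 = m - 2 from by omega,
      show m + 1 - 1 = m from by omega, hlast,
      show m + 1 - 4 = m - 3 from by omega]

lemma alt_eq (N : Int) (h : ¬ N ≤ 6) : optimalKeys_alt N = fK N.toNat := by
  have hN : N = (N.toNat : Int) := by omega
  unfold optimalKeys_alt
  rw [if_neg h]
  conv_lhs => rw [hN]
  rw [alt_loop N.toNat (by omega)]

theorem optimalKeys_spec : Claim_equal_optimalKeys := by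
  intro N _
  unfold Spec_optimalKeys
  by_cases h : N ≤ 6
  · simp [optimalKeys, optimalKeys_alt, h]
  · rw [optimalKeys_eq N h, alt_eq N h]
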